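-- pv_equiv track=rewrite | github.com/srihari200624/MeetMind | backend/extract.py | fuzzy_match_owner
-- ===== SOURCE A (Python) =====
-- def fuzzy_match_owner(owner_name: str, users: list) -> dict | None:
--     """Match extracted owner name to a user in the DB."""
--     owner_lower = owner_name.lower().strip()
--
--     for user in users:
--         if user["name"].lower() == owner_lower:
--             return user
--
--     for user in users:
--         name_parts = user["name"].lower().split()
--         if any(part in owner_lower for part in name_parts):
--             return user
--
--     for user in users:
--         if owner_lower in user["name"].lower() or user["name"].lower() in owner_lower:
--             return user
--
--     return None
-- ===== SOURCE B (Python) =====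
-- def fuzzy_match_owner(owner_name: str, users: list) -> dict | None:
--     """Match extracted owner name to a user in the DB (single pass)."""
--     owner_lower = owner_name.lower().strip()
--     first_partial = None
--     first_substring = None
--     for user in users:
--         name = user["name"].lower()
--         if name == owner_lower:
--             return user
--         if first_partial is None and any(part in owner_lower for part in name.split()):
--             first_partial = user
--         if first_substring is None and (owner_lower in name or name in owner_lower):
--             first_substring = user
--     return first_partial if first_partial is not None else first_substring
-- ===== Notes on version B (the rewrite author's own statement) =====
-- stated objective: faster
-- what changed: Replaces A's three sequential scans of the user list (exact, then word-part, then substring) with one single pass that lowercases each name once, returns immediately on an exact match, and remembers the first word-part match and the first substring match for the fallback tiers.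
import Mathlib
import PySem

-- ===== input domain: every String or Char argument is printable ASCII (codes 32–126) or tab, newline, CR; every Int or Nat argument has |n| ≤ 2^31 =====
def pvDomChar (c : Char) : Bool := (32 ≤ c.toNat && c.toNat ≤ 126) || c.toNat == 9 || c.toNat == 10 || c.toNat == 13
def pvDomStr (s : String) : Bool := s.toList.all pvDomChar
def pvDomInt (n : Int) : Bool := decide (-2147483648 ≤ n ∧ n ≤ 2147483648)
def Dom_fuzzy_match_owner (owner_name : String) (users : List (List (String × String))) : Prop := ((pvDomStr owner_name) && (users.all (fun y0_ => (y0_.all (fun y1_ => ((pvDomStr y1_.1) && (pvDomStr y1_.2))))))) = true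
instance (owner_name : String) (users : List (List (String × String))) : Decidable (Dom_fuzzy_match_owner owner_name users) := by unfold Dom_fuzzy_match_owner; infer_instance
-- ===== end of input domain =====

-- B replaces A's three sequential scans with one single pass (exact returns at once;
-- first word-part match and first substring match are remembered for the fallback tiers);
-- objective: faster by a constant factor (one pass, each name lowercased once).

-- ===== PORT A =====
-- user["name"] (association list, first match); Pre_ guarantees the key exists, so the
-- "" default is never used on admitted inputs (Python raises KeyError when it is missing).
def pvName (u : List (String × String)) : String :=
  ((u.find? (fun p => p.1 == "name")).map Prod.snd).getD ""

-- first for-loop: exact match on the lowered name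
def pvLoop1 (ow : List Char) : List (List (String × String)) → Option (List (String × String))
  | [] => none
  | u :: rest =>
    if PySem.Chars.lower (pvName u).toList == ow then some u else pvLoop1 ow rest

-- second for-loop: any word of the lowered name occurs in owner_lower
def pvLoop2 (ow : List Char) : List (List (String × String)) → Option (List (String × String))
  | [] => none
  | u :: rest =>
    let name_parts := PySem.Chars.split₀ (PySem.Chars.lower (pvName u).toList)
    if name_parts.any (fun part => PySem.Chars.isIn part ow) then some u else pvLoop2 ow rest

-- third for-loop: substring either way
def pvLoop3 (ow : List Char) : List (List (String × String)) → Option (List (String × String))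
  | [] => none
  | u :: rest =>
    let name := PySem.Chars.lower (pvName u).toList
    if PySem.Chars.isIn ow name || PySem.Chars.isIn name ow then some u else pvLoop3 ow rest

def fuzzy_match_owner (owner_name : String) (users : List (List (String × String))) : Option (List (String × String)) :=
  let owner_lower := PySem.Chars.strip (PySem.Chars.lower owner_name.toList)
  match pvLoop1 owner_lower users with
  | some u => some u
  | none =>
    match pvLoop2 owner_lower users with
    | some u => some u
    | none => pvLoop3 owner_lower users

-- ===== PORT B =====
-- single pass carrying (first_partial, first_substring); exact match returns immediately
def pvScan (ow : List Char) : List (List (String × String)) →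
    Option (List (String × String)) → Option (List (String × String)) → Option (List (String × String))
  | [], fp, fs => if fp.isSome then fp else fs
  | u :: rest, fp, fs =>
    let name := PySem.Chars.lower (pvName u).toList
    if name == ow then some u
    else
      let fp' := if fp.isNone && (PySem.Chars.split₀ name).any (fun part => PySem.Chars.isIn part ow) then some u else fp
      let fs' := if fs.isNone && (PySem.Chars.isIn ow name || PySem.Chars.isIn name ow) then some u else fs
      pvScan ow rest fp' fs'

def fuzzy_match_owner_alt (owner_name : String) (users : List (List (String × String))) : Option (List (String × String)) :=
  pvScan (PySem.Chars.strip (PySem.Chars.lower owner_name.toList)) users none none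

-- ===== PRECONDITION & SPEC =====
-- Pre_ excludes exactly the inputs where Python raises KeyError: a user dict without the
-- key "name" that A's first loop reaches, i.e. one not preceded by an exact-match user.
def Pre_fuzzy_match_owner (owner_name : String) (users : List (List (String × String))) : Prop :=
  ∀ i, (hi : i < users.length) →
    ((users[i].find? (fun p => p.1 == "name")).isSome = true) ∨
    ∃ j, ∃ _ : j < i,
      (PySem.Chars.lower ((((users[j].find? (fun p => p.1 == "name")).map Prod.snd).getD "").toList)
        == PySem.Chars.strip (PySem.Chars.lower owner_name.toList)) = true
instance (owner_name : String) (users : List (List (String × String))) : Decidable (Pre_fuzzy_match_owner owner_name users) := by unfold Pre_fuzzy_match_owner; infer_instance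

def pvWitness_fuzzy_match_owner : String × (List (List (String × String))) :=
  ("Alice Smith", [[("name", "Bob")], [("name", "alice smith")]])

def Spec_fuzzy_match_owner (owner_name : String) (users : List (List (String × String))) (out : Option (List (String × String))) : Prop := out = fuzzy_match_owner_alt owner_name users
instance (owner_name : String) (users : List (List (String × String))) (out : Option (List (String × String))) : Decidable (Spec_fuzzy_match_owner owner_name users out) := by unfold Spec_fuzzy_match_owner; infer_instance

-- ===== CLAIM (what is proved, stated in full; the proofs are below) =====
def Claim_equal_fuzzy_match_owner : Prop := ∀ (owner_name : String) (users : List (List (String × String))), Dom_fuzzy_match_owner owner_name users → Pre_fuzzy_match_owner owner_name users → Spec_fuzzy_match_owner owner_name users (fuzzy_match_owner owner_name users)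

-- ===== LEMMAS AND PROOFS =====

-- the single pass equals the three scans, stitched together with Option.or
theorem pvScan_eq (ow : List Char) (us : List (List (String × String)))
    (fp fs : Option (List (String × String))) :
    pvScan ow us fp fs =
      (pvLoop1 ow us).or ((fp.or (pvLoop2 ow us)).or (fs.or (pvLoop3 ow us))) := by
  induction us generalizing fp fs with
  | nil =>
    cases fp <;> cases fs <;> simp [pvScan, pvLoop1, pvLoop2, pvLoop3]
  | cons u rest ih =>
    by_cases hex : (PySem.Chars.lower (pvName u).toList == ow) = true
    · simp [pvScan, pvLoop1, hex]
    · simp only [pvScan, pvLoop1, pvLoop2, pvLoop3]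
      rw [if_neg hex, if_neg hex, ih]
      by_cases hp : ((PySem.Chars.split₀ (PySem.Chars.lower (pvName u).toList)).any
          (fun part => PySem.Chars.isIn part ow)) = true <;>
        by_cases hs : (PySem.Chars.isIn ow (PySem.Chars.lower (pvName u).toList) ||
            PySem.Chars.isIn (PySem.Chars.lower (pvName u).toList) ow) = true <;>
          cases fp <;> cases fs <;>
            simp [hp, hs, Option.or]

theorem fuzzy_match_owner_eq_alt (owner_name : String) (users : List (List (String × String))) :
    fuzzy_match_owner owner_name users = fuzzy_match_owner_alt owner_name users := by
  unfold fuzzy_match_owner fuzzy_match_owner_alt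
  rw [pvScan_eq]
  cases h1 : pvLoop1 (PySem.Chars.strip (PySem.Chars.lower owner_name.toList)) users <;>
    cases h2 : pvLoop2 (PySem.Chars.strip (PySem.Chars.lower owner_name.toList)) users <;>
      simp [h1, h2, Option.or]

-- ===== VERDICT (by name: the statement is the Claim_ definition above) =====
theorem fuzzy_match_owner_spec : Claim_equal_fuzzy_match_owner := by
  intro owner_name users _ _
  exact fuzzy_match_owner_eq_alt owner_name users
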